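-- pv_equiv track=rewrite | github.com/vdwivedi190/qrcode | qrgen/error_correction.py | compute_error_correction_bits
-- ===== SOURCE A (Python) =====
-- def _find_next_nonzero(arr: list[bool]) -> int:
--     """Find the index of the first True element in a boolean array.
--
--     If no True element is found, return the length of the array.
--     """
--     for ind, elem in enumerate(arr):
--         if elem:
--             return ind
--     else:
--         return len(arr)
--
-- def compute_error_correction_bits(
--     msg_coeffs: list[bool], EC_coeffs: list[bool]
-- ) -> list[bool]:
--     """Compute the error correction bits for the given message and error correction coefficients."""
--     msg_len = len(msg_coeffs)
--     ec_len = len(EC_coeffs)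
--     total_len = msg_len + ec_len - 1
--
--     result = [False] * total_len
--     result[:msg_len] = msg_coeffs
--
--     start = _find_next_nonzero(result)
--     while start + ec_len <= total_len:
--         for ind in range(ec_len):
--             result[start + ind] ^= EC_coeffs[ind]
--         start = _find_next_nonzero(result)
--
--     return list(result[-ec_len + 1 :])
-- ===== SOURCE B (Python) =====
-- def compute_error_correction_bits(msg_coeffs, EC_coeffs):
--     """One forward pass: XOR the generator into the work array at each True cell."""
--     msg_len = len(msg_coeffs)
--     ec_len = len(EC_coeffs)
--     result = list(msg_coeffs) + [False] * (ec_len - 1)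
--     for i in range(msg_len):
--         if result[i]:
--             for j in range(ec_len):
--                 result[i + j] ^= EC_coeffs[j]
--     return result[msg_len:]
-- ===== Notes on version B (the rewrite author's own statement) =====
-- stated objective: simpler
-- what changed: Replaced A's repeated find-first-nonzero scan with a while loop by a single left-to-right index pass that XORs the generator wherever the current cell is 1, returning the last ec_len-1 cells directly.
-- intended difference: When EC_coeffs has length 1 and msg_coeffs is nonempty, A's slice result[-1+1:] degenerates to the whole work array and A returns [False]*len(msg_coeffs); B returns [], the ec_len-1 = 0 error-correction bits a degree-0 generator actually produces. — e.g. on compute_error_correction_bits([true], [true]): A returns [false], B returns []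
-- outside the precondition, e.g. on compute_error_correction_bits([False, False], []): A returns [False], B returns []; on compute_error_correction_bits([True], []): A does not finish within the time limit, B returns []; on compute_error_correction_bits([True], [False, True]): A does not finish within the time limit, B returns [True]
import Mathlib
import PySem

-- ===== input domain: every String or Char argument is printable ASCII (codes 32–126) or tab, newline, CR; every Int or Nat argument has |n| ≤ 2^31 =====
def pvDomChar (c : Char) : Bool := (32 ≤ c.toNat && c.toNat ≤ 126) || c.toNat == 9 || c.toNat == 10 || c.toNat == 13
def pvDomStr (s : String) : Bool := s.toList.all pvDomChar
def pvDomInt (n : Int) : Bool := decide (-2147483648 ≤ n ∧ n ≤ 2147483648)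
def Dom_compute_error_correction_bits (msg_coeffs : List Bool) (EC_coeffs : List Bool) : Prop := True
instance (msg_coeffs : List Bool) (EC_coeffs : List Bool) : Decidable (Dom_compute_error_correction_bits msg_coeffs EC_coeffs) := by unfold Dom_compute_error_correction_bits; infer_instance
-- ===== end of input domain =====

-- B replaces A's repeated find-first-nonzero/while scan by a single left-to-right pass (simpler);
-- on EC lists of length 1 with a nonempty message A's degenerate slice returns the whole all-False
-- work array while B returns the intended empty list of EC bits (see D_ below).

-- ===== PORT A =====
-- _find_next_nonzero: first index holding True, else the length
def pvFindNextNonzero : List Bool → Nat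
  | [] => 0
  | b :: rest => if b then 0 else pvFindNextNonzero rest + 1

-- the inner 'for ind in range(ec_len): result[start+ind] ^= EC_coeffs[ind]'
def pvXorRow (EC : List Bool) (start : Nat) (result : List Bool) : List Bool :=
  (List.range EC.length).foldl
    (fun r ind => r.set (start + ind) (xor (r.getD (start + ind) false) (EC.getD ind false))) result

-- the while loop; fuel only makes it total (under Pre_ the loop runs at most total_len+1 times)
def pvDivLoop (EC : List Bool) (ec_len total_len : Nat) : Nat → List Bool → List Bool
  | 0, result => result
  | fuel + 1, result =>
    let start := pvFindNextNonzero result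
    if start + ec_len ≤ total_len then
      pvDivLoop EC ec_len total_len fuel (pvXorRow EC start result)
    else result

def compute_error_correction_bits (msg_coeffs : List Bool) (EC_coeffs : List Bool) : List Bool :=
  let msg_len := msg_coeffs.length
  let ec_len := EC_coeffs.length
  let total_len := msg_len + ec_len - 1
  -- result = [False]*total_len; result[:msg_len] = msg_coeffs
  let result := msg_coeffs ++ List.replicate (total_len - msg_len) false
  let final := pvDivLoop EC_coeffs ec_len total_len (total_len + 1) result
  PySem.List.slice final (some (-(ec_len : Int) + 1)) none

-- ===== PORT B =====
def compute_error_correction_bits_alt (msg_coeffs : List Bool) (EC_coeffs : List Bool) : List Bool :=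
  let msg_len := msg_coeffs.length
  let ec_len := EC_coeffs.length
  let result := msg_coeffs ++ List.replicate (ec_len - 1) false
  let final := (List.range msg_len).foldl
    (fun r i =>
      if r.getD i false then
        (List.range ec_len).foldl
          (fun r2 j => r2.set (i + j) (xor (r2.getD (i + j) false) (EC_coeffs.getD j false))) r
      else r) result
  final.drop msg_len

-- ===== PRECONDITION & SPEC =====
-- Pre_ excludes empty generator polynomials (A loops forever on any nonzero message, and on the
-- remaining all-zero messages its slice result[1:] returns a stray all-False list) and generators
-- without the leading 1 bit paired with a nonzero message (there A loops forever); QR generators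
-- always start with a 1.
def Pre_compute_error_correction_bits (msg_coeffs : List Bool) (EC_coeffs : List Bool) : Prop :=
  EC_coeffs ≠ [] ∧ (EC_coeffs.head? = some true ∨ ∀ b ∈ msg_coeffs, b = false)
instance (msg_coeffs : List Bool) (EC_coeffs : List Bool) : Decidable (Pre_compute_error_correction_bits msg_coeffs EC_coeffs) := by unfold Pre_compute_error_correction_bits; infer_instance

def pvWitness_compute_error_correction_bits : List Bool × List Bool := ([true, false], [true, true])

-- When EC_coeffs has length 1 and msg_coeffs is nonempty, A's slice result[-1+1:] degenerates to
-- the whole work array and A returns [False]*len(msg_coeffs); B returns [], the ec_len-1 = 0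
-- error-correction bits a degree-0 generator actually produces.
def D_compute_error_correction_bits (msg_coeffs : List Bool) (EC_coeffs : List Bool) : Prop :=
  EC_coeffs.length = 1 ∧ msg_coeffs ≠ []
instance (msg_coeffs : List Bool) (EC_coeffs : List Bool) : Decidable (D_compute_error_correction_bits msg_coeffs EC_coeffs) := by unfold D_compute_error_correction_bits; infer_instance

def Spec_compute_error_correction_bits (msg_coeffs : List Bool) (EC_coeffs : List Bool) (out : List Bool) : Prop := ¬ D_compute_error_correction_bits msg_coeffs EC_coeffs → out = compute_error_correction_bits_alt msg_coeffs EC_coeffs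
instance (msg_coeffs : List Bool) (EC_coeffs : List Bool) (out : List Bool) : Decidable (Spec_compute_error_correction_bits msg_coeffs EC_coeffs out) := by unfold Spec_compute_error_correction_bits; infer_instance

def pvDiffWitness_compute_error_correction_bits : List Bool × List Bool := ([true], [true])
def pvDiffWitnessOut_compute_error_correction_bits : (List Bool) × (List Bool) := ([false], [])

-- ===== CLAIM =====
def Claim_unchanged_compute_error_correction_bits : Prop := ∀ (msg_coeffs : List Bool) (EC_coeffs : List Bool), Dom_compute_error_correction_bits msg_coeffs EC_coeffs → Pre_compute_error_correction_bits msg_coeffs EC_coeffs → Spec_compute_error_correction_bits msg_coeffs EC_coeffs (compute_error_correction_bits msg_coeffs EC_coeffs)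
def Claim_changed_compute_error_correction_bits : Prop := Dom_compute_error_correction_bits (pvDiffWitness_compute_error_correction_bits.1) (pvDiffWitness_compute_error_correction_bits.2) ∧ Pre_compute_error_correction_bits (pvDiffWitness_compute_error_correction_bits.1) (pvDiffWitness_compute_error_correction_bits.2) ∧ D_compute_error_correction_bits (pvDiffWitness_compute_error_correction_bits.1) (pvDiffWitness_compute_error_correction_bits.2) ∧ compute_error_correction_bits (pvDiffWitness_compute_error_correction_bits.1) (pvDiffWitness_compute_error_correction_bits.2) = pvDiffWitnessOut_compute_error_correction_bits.1 ∧ compute_error_correction_bits_alt (pvDiffWitness_compute_error_correction_bits.1) (pvDiffWitness_compute_error_correction_bits.2) = pvDiffWitnessOut_compute_error_correction_bits.2 ∧ pvDiffWitnessOut_compute_error_correction_bits.1 ≠ pvDiffWitnessOut_compute_error_correction_bits.2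
def Claim_exact_compute_error_correction_bits : Prop := ∀ (msg_coeffs : List Bool) (EC_coeffs : List Bool), Dom_compute_error_correction_bits msg_coeffs EC_coeffs → Pre_compute_error_correction_bits msg_coeffs EC_coeffs → D_compute_error_correction_bits msg_coeffs EC_coeffs → compute_error_correction_bits msg_coeffs EC_coeffs ≠ compute_error_correction_bits_alt msg_coeffs EC_coeffs

-- ===== LEMMAS AND PROOFS =====

-- the one division step shared by both shapes of the loop
def pvStep (EC : List Bool) (r : List Bool) (i : Nat) : List Bool :=
  if r.getD i false then pvXorRow EC i r else r

theorem pvFoldSet_length (EC : List Bool) (s : Nat) : ∀ (l : List Nat) (r : List Bool),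
    (l.foldl (fun r ind => r.set (s + ind) (xor (r.getD (s + ind) false) (EC.getD ind false))) r).length = r.length := by
  intro l
  induction l with
  | nil => intro r; rfl
  | cons a t ih => intro r; rw [List.foldl_cons, ih, List.length_set]

theorem pvXorRow_length (EC : List Bool) (s : Nat) (r : List Bool) :
    (pvXorRow EC s r).length = r.length := pvFoldSet_length EC s _ r

theorem pvXorRow_getD (EC : List Bool) (s : Nat) : ∀ (n : Nat) (r : List Bool) (k : Nat),
    ((List.range n).foldl (fun r ind => r.set (s + ind) (xor (r.getD (s + ind) false) (EC.getD ind false))) r).getD k false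
      = if s ≤ k ∧ k < s + n ∧ k < r.length then xor (r.getD k false) (EC.getD (k - s) false) else r.getD k false := by
  intro n
  induction n with
  | zero =>
    intro r k
    rw [List.range_zero, List.foldl_nil, if_neg (show ¬ (s ≤ k ∧ k < s + 0 ∧ k < r.length) by omega)]
  | succ n ih =>
    intro r k
    rw [List.range_succ]
    simp only [List.foldl_append, List.foldl_cons, List.foldl_nil]
    set R := (List.range n).foldl (fun r ind => r.set (s + ind) (xor (r.getD (s + ind) false) (EC.getD ind false))) r with hR
    have hRlen : R.length = r.length := pvFoldSet_length EC s _ r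
    have hRtop : R.getD (s + n) false = r.getD (s + n) false := by
      rw [hR, ih, if_neg (show ¬ (s ≤ s + n ∧ s + n < s + n ∧ s + n < r.length) by omega)]
    by_cases hk : k = s + n
    · subst hk
      by_cases hin : s + n < r.length
      · rw [List.getD_eq_getElem?_getD, List.getElem?_set_self (by omega), hRtop,
            if_pos (show s ≤ s + n ∧ s + n < s + (n + 1) ∧ s + n < r.length from ⟨by omega, by omega, hin⟩)]
        simp
      · rw [List.getD_eq_getElem?_getD, List.set_eq_of_length_le (by omega), ← List.getD_eq_getElem?_getD, hR, ih,
            if_neg (show ¬ (s ≤ s + n ∧ s + n < s + n ∧ s + n < r.length) by omega),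
            if_neg (show ¬ (s ≤ s + n ∧ s + n < s + (n + 1) ∧ s + n < r.length) by omega)]
    · rw [List.getD_eq_getElem?_getD, List.getElem?_set_ne (by omega), ← List.getD_eq_getElem?_getD, hR, ih]
      by_cases h1 : s ≤ k ∧ k < s + n ∧ k < r.length
      · rw [if_pos h1, if_pos (show s ≤ k ∧ k < s + (n + 1) ∧ k < r.length from ⟨h1.1, by omega, h1.2.2⟩)]
      · rw [if_neg h1, if_neg (show ¬ (s ≤ k ∧ k < s + (n + 1) ∧ k < r.length) by omega)]

theorem pvFindNext_lt (r : List Bool) : ∀ k, k < pvFindNextNonzero r → r.getD k false = false := by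
  induction r with
  | nil => intro k h; simp [pvFindNextNonzero] at h
  | cons b t ih =>
    intro k h
    cases b with
    | true => simp [pvFindNextNonzero] at h
    | false =>
      simp only [pvFindNextNonzero, if_neg (by simp : ¬ (false = true))] at h
      cases k with
      | zero => simp
      | succ k => simpa using ih k (by omega)

theorem pvFindNext_self (r : List Bool) (h : pvFindNextNonzero r < r.length) :
    r.getD (pvFindNextNonzero r) false = true := by
  induction r with
  | nil => simp at h
  | cons b t ih =>
    cases b with
    | true => simp [pvFindNextNonzero]
    | false =>
      simp only [pvFindNextNonzero, if_neg (by simp : ¬ (false = true))] at h ⊢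
      simpa using ih (by simpa using Nat.lt_of_succ_lt_succ h)

theorem pvFoldNoop (EC : List Bool) : ∀ (l : List Nat) (r : List Bool),
    (∀ k ∈ l, r.getD k false = false) → l.foldl (pvStep EC) r = r := by
  intro l
  induction l with
  | nil => intro r _; rfl
  | cons a t ih =>
    intro r h
    have ha : r.getD a false = false := h a (by simp)
    simp only [List.foldl, pvStep, ha, Bool.false_eq_true, if_false]
    exact ih r (fun k hk => h k (by simp [hk]))

-- A's scan-loop computes the same fold of pvStep over the remaining indices
theorem pvLoop_eq_fold (EC : List Bool) (m : Nat) (hEC : EC.head? = some true) :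
    ∀ (fuel i : Nat) (r : List Bool), r.length = m + EC.length - 1 →
      (∀ k, k < i → r.getD k false = false) → i ≤ m → m - i ≤ fuel →
      pvDivLoop EC EC.length (m + EC.length - 1) fuel r
        = (List.range' i (m - i)).foldl (pvStep EC) r := by
  have hec1 : 1 ≤ EC.length := by cases EC <;> simp_all
  have hEC0 : EC.getD 0 false = true := by cases EC <;> simp_all
  intro fuel
  induction fuel with
  | zero =>
    intro i r hlen hz him hfuel
    have : i = m := by omega
    subst this
    simp [pvDivLoop]
  | succ fuel ih =>
    intro i r hlen hz him hfuel
    simp only [pvDivLoop]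
    set s := pvFindNextNonzero r with hs
    by_cases hcond : s + EC.length ≤ m + EC.length - 1
    · have hsm : s < m := by omega
      have hsl : s < r.length := by omega
      have hsi : i ≤ s := by
        by_contra hlt
        have := hz s (by omega)
        rw [pvFindNext_self r (by omega)] at this
        exact absurd this (by simp)
      have hsv : r.getD s false = true := pvFindNext_self r (by omega)
      -- split the index range at s
      have hsplit : List.range' i (m - i) = List.range' i (s - i) ++ s :: List.range' (s + 1) (m - (s + 1)) := by
        have h1 := List.range'_append (s := i) (m := s - i) (n := m - s) (step := 1)
        rw [one_mul] at h1
        rw [show i + (s - i) = s by omega, show s - i + (m - s) = m - i by omega] at h1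
        rw [← h1]
        congr 1
        rw [show m - s = (m - (s + 1)) + 1 by omega, List.range'_succ]
      rw [if_pos hcond, hsplit, List.foldl_append]
      rw [pvFoldNoop EC _ r (by
        intro k hk
        have := List.mem_range'.mp hk
        exact pvFindNext_lt r k (by omega))]
      rw [List.foldl_cons]
      rw [show pvStep EC r s = pvXorRow EC s r by unfold pvStep; rw [hsv]; simp]
      have hr'len : (pvXorRow EC s r).length = m + EC.length - 1 := by
        rw [pvXorRow_length]; exact hlen
      refine (ih (s + 1) (pvXorRow EC s r) hr'len ?_ (by omega) (by omega))
      intro k hk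
      unfold pvXorRow
      rw [pvXorRow_getD]
      by_cases hks : k = s
      · subst hks
        rw [if_pos (show s ≤ s ∧ s < s + EC.length ∧ s < r.length from ⟨le_refl s, by omega, hsl⟩),
            Nat.sub_self, hsv, hEC0]
        rfl
      · rw [if_neg (show ¬ (s ≤ k ∧ k < s + EC.length ∧ k < r.length) by omega)]
        exact pvFindNext_lt r k (by omega)
    · rw [if_neg hcond]
      have hsm : m ≤ s := by omega
      rw [pvFoldNoop EC _ r (by
        intro k hk
        have := List.mem_range'.mp hk
        exact pvFindNext_lt r k (by omega))]

theorem pvStep_length (EC : List Bool) : ∀ (l : List Nat) (r : List Bool),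
    (l.foldl (pvStep EC) r).length = r.length := by
  intro l
  induction l with
  | nil => intro r; rfl
  | cons a t ih =>
    intro r
    rw [List.foldl]
    rw [ih]
    unfold pvStep
    split
    · exact pvXorRow_length EC a r
    · rfl

-- B's port is the fold of pvStep over range msg_len (same lambda, named)
theorem alt_eq_fold (msg EC : List Bool) :
    compute_error_correction_bits_alt msg EC
      = ((List.range msg.length).foldl (pvStep EC) (msg ++ List.replicate (EC.length - 1) false)).drop msg.length := by
  rfl

theorem pvAllFalse_getD (l : List Bool) (h : ∀ b ∈ l, b = false) (k : Nat) :
    l.getD k false = false := by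
  rw [List.getD_eq_getElem?_getD]
  cases hg : l[k]? with
  | none => rfl
  | some b => simpa using h b (List.mem_of_getElem? hg)

theorem pvFindNext_allFalse (l : List Bool) (h : ∀ b ∈ l, b = false) :
    pvFindNextNonzero l = l.length := by
  induction l with
  | nil => rfl
  | cons b t ih =>
    have hb : b = false := h b (by simp)
    subst hb
    simp only [pvFindNextNonzero, if_neg (by simp : ¬ (false = true)), List.length_cons]
    rw [ih (fun x hx => h x (by simp [hx]))]

theorem pvDivLoop_length (EC : List Bool) (ec tot : Nat) :
    ∀ (fuel : Nat) (r : List Bool), (pvDivLoop EC ec tot fuel r).length = r.length := by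
  intro fuel
  induction fuel with
  | zero => intro r; rfl
  | succ n ih =>
    intro r
    simp only [pvDivLoop]
    split
    · rw [ih, pvXorRow_length]
    · rfl

theorem compute_error_correction_bits_spec : Claim_unchanged_compute_error_correction_bits := by
  intro msg EC _ hpre hnd
  obtain ⟨hne, hpre2⟩ := hpre
  have hec1 : 1 ≤ EC.length := List.length_pos_iff.mpr hne
  set m := msg.length with hm
  have hinitlen : (msg ++ List.replicate (m + EC.length - 1 - m) false).length = m + EC.length - 1 := by
    simp; omega
  have hrep : m + EC.length - 1 - m = EC.length - 1 := by omega
  have hfold : pvDivLoop EC EC.length (m + EC.length - 1) (m + EC.length - 1 + 1)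
      (msg ++ List.replicate (m + EC.length - 1 - m) false)
      = (List.range' 0 m).foldl (pvStep EC) (msg ++ List.replicate (m + EC.length - 1 - m) false) := by
    rcases hpre2 with hEC | hall
    · simpa using pvLoop_eq_fold EC m hEC (m + EC.length - 1 + 1) 0
        (msg ++ List.replicate (m + EC.length - 1 - m) false) hinitlen (by omega) (by omega) (by omega)
    · have hallinit : ∀ b ∈ msg ++ List.replicate (m + EC.length - 1 - m) false, b = false := by
        intro b hb
        rcases List.mem_append.mp hb with h | h
        · exact hall b h
        · exact List.eq_of_mem_replicate h
      have hfn : pvFindNextNonzero (msg ++ List.replicate (m + EC.length - 1 - m) false)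
          = m + EC.length - 1 := by
        rw [pvFindNext_allFalse _ hallinit, hinitlen]
      simp only [pvDivLoop]
      rw [hfn, if_neg (by omega),
        pvFoldNoop EC _ _ (fun k _ => pvAllFalse_getD _ hallinit k)]
  unfold compute_error_correction_bits
  simp only []
  rw [hfold, ← List.range_eq_range', hrep]
  set F := (List.range m).foldl (pvStep EC) (msg ++ List.replicate (EC.length - 1) false) with hF
  have hFlen : F.length = m + EC.length - 1 := by
    rw [hF, pvStep_length]; simp; omega
  rw [alt_eq_fold, ← hm, ← hF]
  by_cases h1 : EC.length = 1
  · -- ¬D forces msg = []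
    have hmsg : msg = [] := by
      by_contra hnemsg
      exact hnd ⟨h1, hnemsg⟩
    subst hmsg
    simp only [hm] at *
    rw [show (-(EC.length : Int) + 1) = 0 by rw [h1]; norm_num,
      PySem.List.slice_zero_start (xs := F) (b? := none), PySem.List.slice_none_none]
    simp [hm]
  · -- EC.length ≥ 2: the slice is drop msg_len
    have hneg : (-(EC.length : Int) + 1) = -(((EC.length - 1 : Nat)) : Int) := by
      push_cast [Nat.cast_sub (by omega : 1 ≤ EC.length)]; ring
    rw [hneg, PySem.List.slice_from_neg_natCast F (EC.length - 1) (by omega)]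
    congr 1
    omega

-- ===== VERDICT =====
theorem compute_error_correction_bits_changed : Claim_changed_compute_error_correction_bits := by
  unfold Claim_changed_compute_error_correction_bits; decide

theorem compute_error_correction_bits_tight : Claim_exact_compute_error_correction_bits := by
  intro msg EC _ hpre hd heq
  obtain ⟨h1, hne⟩ := hd
  have hlenA : (compute_error_correction_bits msg EC).length = msg.length := by
    unfold compute_error_correction_bits
    simp only []
    rw [show (-(EC.length : Int) + 1) = 0 by rw [h1]; norm_num,
      PySem.List.slice_zero_start, PySem.List.slice_none_none, pvDivLoop_length]
    simp [List.length_append, List.length_replicate]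
    omega
  have hlenB : (compute_error_correction_bits_alt msg EC).length = 0 := by
    rw [alt_eq_fold, List.length_drop, pvStep_length]
    simp [h1]
  rw [heq, hlenB] at hlenA
  have : msg.length ≠ 0 := by simpa using (List.length_pos_iff.mpr hne).ne'
  omega
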